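-- pv_equiv track=rewrite | github.com/espiacent/codewars | odd_triangle_sum.py | odd_triangle
-- ===== SOURCE A (Python) =====
-- def odd_triangle(n):
--     # edge case
--     if n == 1:
--         return 1
--     # get length of list
--     lst = []
--     counter_a = 0
--     base = 0
--     while counter_a < n:
--         base = base + 1
--         lst.append(base)
--         counter_a = counter_a + 1
--     length_triangle = sum(lst)
--
-- # generate list of odd numbers of this length
--     counter_b = 0
--     next = 1
--     odd_numbers = []
--     while counter_b < length_triangle:
--         next = next + 2
--         odd_numbers.append(next)
--         counter_b = counter_b + 1
--     final_list = odd_numbers[-n-1:-1]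
--     return sum(final_list)
-- ===== SOURCE B (Python) =====
-- def odd_triangle(n):
--     # Last row of the odd-number triangle with n rows sums to n**3;
--     # for a nonpositive number of rows the row is empty, so the sum is 0.
--     return max(n, 0) ** 3
-- ===== Notes on version B (the rewrite author's own statement) =====
-- stated objective: faster
-- what changed: Replaced the two O(n^2)-work list-building loops plus slice-and-sum with the arithmetic-series closed form max(n,0)**3.
import Mathlib
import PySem

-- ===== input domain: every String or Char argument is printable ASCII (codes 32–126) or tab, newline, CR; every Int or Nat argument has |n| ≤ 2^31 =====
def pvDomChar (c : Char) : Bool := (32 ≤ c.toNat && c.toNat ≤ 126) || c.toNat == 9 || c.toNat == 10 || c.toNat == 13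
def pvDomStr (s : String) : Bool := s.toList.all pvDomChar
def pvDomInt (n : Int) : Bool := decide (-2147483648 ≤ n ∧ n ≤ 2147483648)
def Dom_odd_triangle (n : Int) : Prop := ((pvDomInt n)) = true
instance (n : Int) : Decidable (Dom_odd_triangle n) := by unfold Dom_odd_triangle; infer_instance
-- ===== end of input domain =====

-- B replaces A's two quadratic-work list-building loops plus slice-and-sum by the closed form max(n,0)^3 (faster).


-- ===== PORT A =====
-- while counter_a < n: base += 1; lst.append(base); counter_a += 1  (append ported as cons + final reverse)
def oddLoopA (n counter base : Int) (lst : List Int) : List Int :=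
  if counter < n then oddLoopA n (counter + 1) (base + 1) ((base + 1) :: lst) else lst.reverse
termination_by (n - counter).toNat
decreasing_by omega

-- while counter_b < length_triangle: next += 2; odd_numbers.append(next); counter_b += 1  (append ported as cons + final reverse)
def oddLoopB (len counter next : Int) (odds : List Int) : List Int :=
  if counter < len then oddLoopB len (counter + 1) (next + 2) ((next + 2) :: odds) else odds.reverse
termination_by (len - counter).toNat
decreasing_by omega

def odd_triangle (n : Int) : Int :=
  if n = 1 then 1
  else
    let lst := oddLoopA n 0 0 []
    let length_triangle := lst.sum
    let odd_numbers := oddLoopB length_triangle 0 1 []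
    let final_list := PySem.List.slice odd_numbers (some (-n - 1)) (some (-1))
    final_list.sum

-- ===== PORT B =====
def odd_triangle_alt (n : Int) : Int := (max n 0) ^ 3

-- ===== PRECONDITION & SPEC =====
def Spec_odd_triangle (n : Int) (out : Int) : Prop := out = odd_triangle_alt n
instance (n : Int) (out : Int) : Decidable (Spec_odd_triangle n out) := by unfold Spec_odd_triangle; infer_instance

-- ===== CLAIM (what is proved, stated in full; the proofs are below) =====
def Claim_equal_odd_triangle : Prop := ∀ (n : Int), Dom_odd_triangle n → Spec_odd_triangle n (odd_triangle n)

-- ===== LEMMAS AND PROOFS =====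

theorem oddLoopA_inv (k : Nat) : ∀ (n c b : Int) (lst : List Int), n - c = k →
    oddLoopA n c b lst = lst.reverse ++ (List.range k).map (fun i : Nat => b + i + 1) := by
  induction k with
  | zero =>
    intro n c b lst h
    rw [oddLoopA, if_neg (by omega)]
    simp
  | succ k ih =>
    intro n c b lst h
    rw [oddLoopA, if_pos (by omega)]
    rw [ih n (c + 1) (b + 1) ((b + 1) :: lst) (by omega)]
    rw [List.reverse_cons, List.append_assoc, List.range_succ_eq_map]
    simp only [List.map_cons, List.map_map, List.singleton_append]
    congr 1
    congr 1
    · push_cast; ring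
    · apply List.map_congr_left
      intro i _
      simp only [Function.comp_apply, Nat.succ_eq_add_one]
      push_cast
      ring

theorem oddLoopB_inv (k : Nat) : ∀ (len c x : Int) (odds : List Int), len - c = k →
    oddLoopB len c x odds = odds.reverse ++ (List.range k).map (fun i : Nat => x + 2 * i + 2) := by
  induction k with
  | zero =>
    intro len c x odds h
    rw [oddLoopB, if_neg (by omega)]
    simp
  | succ k ih =>
    intro len c x odds h
    rw [oddLoopB, if_pos (by omega)]
    rw [ih len (c + 1) (x + 2) ((x + 2) :: odds) (by omega)]
    rw [List.reverse_cons, List.append_assoc, List.range_succ_eq_map]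
    simp only [List.map_cons, List.map_map, List.singleton_append]
    congr 1
    congr 1
    · push_cast; ring
    · apply List.map_congr_left
      intro i _
      simp only [Function.comp_apply, Nat.succ_eq_add_one]
      push_cast
      ring

-- sum of the first m values 1..m, doubled (avoids integer division)
theorem sumA (m : Nat) :
    2 * (((List.range m).map (fun i : Nat => (0 : Int) + i + 1)).sum) = (m : Int) * m + m := by
  induction m with
  | zero => simp
  | succ m ih =>
    rw [List.range_succ, List.map_append, List.sum_append]
    simp only [List.map_cons, List.map_nil, List.sum_cons, List.sum_nil]
    push_cast
    push_cast at ih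
    linarith [ih]

-- sum of m consecutive odd values 3+2s, 3+2(s+1), …
theorem sumB (m : Nat) : ∀ (s : Nat),
    ((List.range' s m).map (fun i : Nat => (1 : Int) + 2 * i + 2)).sum
      = (m : Int) * (2 * s + m + 2) := by
  induction m with
  | zero => intro s; simp
  | succ m ih =>
    intro s
    rw [List.range'_succ, List.map_cons, List.sum_cons, ih (s + 1)]
    push_cast
    ring

theorem odd_triangle_eq_cube (n : Int) : odd_triangle n = (max n 0) ^ 3 := by
  by_cases h1 : n = 1
  · subst h1; simp [odd_triangle]
  by_cases hneg : n ≤ 0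
  · -- both loops run zero times: the slice of the empty list sums to 0
    rw [odd_triangle, if_neg h1]
    rw [oddLoopA, if_neg (by omega)]
    simp only [List.reverse_nil, List.sum_nil]
    rw [oddLoopB, if_neg (by omega)]
    have hmax : max n 0 = 0 := by omega
    simp [PySem.List.slice, hmax]
  · -- main case n ≥ 2
    have hn2 : 2 ≤ n := by omega
    obtain ⟨m, hm⟩ : ∃ m : Nat, n = (m : Int) := ⟨n.toNat, by omega⟩
    subst hm
    have hm2 : 2 ≤ m := by exact_mod_cast hn2
    rw [odd_triangle, if_neg h1]
    rw [oddLoopA_inv m (m : Int) 0 0 [] (by omega)]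
    simp only [List.reverse_nil, List.nil_append]
    set T : Int := ((List.range m).map (fun i : Nat => (0 : Int) + i + 1)).sum with hT
    have h2T : 2 * T = (m : Int) * m + m := sumA m
    have hmm : (m : Int) * m ≥ 2 * m := by
      have := Nat.mul_le_mul_right m hm2
      exact_mod_cast this
    have hTpos : T ≥ (m : Int) + 1 := by omega
    obtain ⟨L, hL⟩ : ∃ L : Nat, T = (L : Int) := ⟨T.toNat, by omega⟩
    rw [oddLoopB_inv L T 0 1 [] (by omega)]
    simp only [List.reverse_nil, List.nil_append]
    -- the slice [-n-1 : -1] of the L odd numbers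
    have hLm : (m : Int) + 1 ≤ L := by omega
    have hlen : ((List.range L).map (fun i : Nat => (1 : Int) + 2 * i + 2)).length = L := by
      simp
    set a' : Nat := L - (m + 1) with ha'
    have hLsplit : L = a' + (m + 1) := by omega
    have hclamp1 : PySem.List.clampIdx L (-(m : Int) - 1) = a' := by
      simp only [PySem.List.clampIdx]
      rw [if_pos (by omega), if_neg (by omega)]
      omega
    have hclamp2 : PySem.List.clampIdx L (-1) = a' + m := by
      simp only [PySem.List.clampIdx]
      rw [if_pos (by omega), if_neg (by omega)]
      omega
    simp only [PySem.List.slice, hlen, hclamp1, hclamp2]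
    have hsplit : List.range L = List.range' 0 a' ++ (List.range' a' m ++ [a' + m]) := by
      rw [hLsplit, List.range_eq_range',
        ← List.range'_append (s := 0) (m := a') (n := m + 1) (step := 1)]
      norm_num [List.range'_1_concat]
    rw [hsplit, List.map_append, List.drop_append_of_le_length (by simp)]
    rw [List.drop_of_length_le (by simp)]
    simp only [List.nil_append]
    have htk : a' + m - a' = m := by omega
    rw [htk, List.map_append, List.take_append_of_le_length (by simp), List.take_of_length_le (by simp)]
    rw [sumB m a']
    have hA : (a' : Int) = T - m - 1 := by omega
    rw [hA]
    have hmax : max ((m : Int)) 0 = (m : Int) := by omega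
    rw [hmax]
    linear_combination (m : Int) * h2T

-- ===== VERDICT (by name: the statement is the Claim_ definition above) =====
theorem odd_triangle_spec : Claim_equal_odd_triangle := by
  intro n _
  unfold Spec_odd_triangle odd_triangle_alt
  exact odd_triangle_eq_cube n
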